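-- pv_equiv track=rewrite | github.com/gali1998/ExtendedIntroToCSHomework | 3/tomer.py | tomer_inv_cycle
-- ===== SOURCE A (Python) =====
-- def tomer_inv_cycle(n):
--     lst = []
--     for i in range(n):
--         lst.append([])
--         for j in range(n):
--             if j - 1 == i or j + 1 == i or i - j == n - 1 or i - j == 1 - n or (j ** (n - 2)) % n == i or (
--                     i == j and i == 0):
--                 lst[i].append(1)
--             else:
--                 lst[i].append(0)
--     return lst
-- ===== SOURCE B (Python) =====
-- def tomer_inv_cycle(n):
--     # Precompute the set of 1-positions (O(n) modular pows), then fill the grid.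
--     ones = {(0, 0)}
--     for k in range(n - 1):
--         ones.add((k, k + 1))
--         ones.add((k + 1, k))
--     if n >= 1:
--         ones.add((n - 1, 0))
--         ones.add((0, n - 1))
--     if n >= 2:
--         for j in range(n):
--             ones.add((pow(j, n - 2, n), j))
--     return [[1 if (i, j) in ones else 0 for j in range(n)] for i in range(n)]
-- ===== Notes on version B (the rewrite author's own statement) =====
-- stated objective: faster
-- what changed: Instead of testing the 6-way condition (with a bignum power j**(n-2) per cell) on all n^2 cells, B precomputes the set of 1-positions — diagonals, corners, and n modular powers pow(j, n-2, n) — and then fills the grid by set membership.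
import Mathlib
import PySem

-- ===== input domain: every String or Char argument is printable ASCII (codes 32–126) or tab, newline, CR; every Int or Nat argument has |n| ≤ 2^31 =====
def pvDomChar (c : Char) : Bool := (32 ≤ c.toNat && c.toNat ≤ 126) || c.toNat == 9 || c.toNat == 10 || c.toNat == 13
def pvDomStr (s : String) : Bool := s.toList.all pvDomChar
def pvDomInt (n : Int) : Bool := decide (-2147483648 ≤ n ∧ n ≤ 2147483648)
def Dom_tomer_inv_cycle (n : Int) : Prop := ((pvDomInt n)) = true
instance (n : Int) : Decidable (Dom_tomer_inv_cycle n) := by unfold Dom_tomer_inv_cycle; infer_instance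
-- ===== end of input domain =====

-- B precomputes the set of 1-positions (O(n) modular pows) instead of testing every cell; same return value, measurably faster.


-- ===== PORT A =====
-- The big if-condition of A, in Python's order.  'j ** (n - 2)' is ported with a
-- Nat exponent (n-2).toNat: Python only evaluates this term when n ≥ 2 (for n = 1 the
-- sole cell (0,0) short-circuits at 'i - j == n - 1', and Lean's '||' likewise makes
-- the whole condition true there regardless), so the port is exact on every reached cell.
def condA (n i j : Int) : Bool :=
  (j - 1 == i) || (j + 1 == i) || (i - j == n - 1) || (i - j == 1 - n) ||
    (PySem.Int.mod (j ^ (n - 2).toNat) n == i) || (i == j && i == 0)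

def tomer_inv_cycle (n : Int) : List (List Int) :=
  (PySem.List.pyRange 0 n 1).foldl (fun lst i =>
    -- lst.append([]) then the inner loop appends into lst[i]
    (PySem.List.pyRange 0 n 1).foldl (fun lst j =>
      if condA n i j then
        lst.modify i.toNat (fun row => row ++ [1])   -- lst[i].append(1)
      else
        lst.modify i.toNat (fun row => row ++ [0])   -- lst[i].append(0)
      ) (lst ++ [([] : List Int)])) []

-- ===== PORT B =====
-- the Python set 'ones' of Source B (pow(j, n-2, n) is PySem.Int.powMod)
def onesDiag (n : Int) (s : PySem.Set (Int × Int)) : PySem.Set (Int × Int) :=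
  (PySem.List.pyRange 0 (n - 1) 1).foldl (fun s k => (s.add (k, k + 1)).add (k + 1, k)) s

def onesCorners (n : Int) (s : PySem.Set (Int × Int)) : PySem.Set (Int × Int) :=
  if n ≥ 1 then (s.add (n - 1, 0)).add (0, n - 1) else s

def onesPow (n : Int) (s : PySem.Set (Int × Int)) : PySem.Set (Int × Int) :=
  if n ≥ 2 then
    (PySem.List.pyRange 0 n 1).foldl
      (fun s j => s.add (PySem.Int.powMod j (n - 2).toNat n, j)) s
  else s

def onesSet (n : Int) : PySem.Set (Int × Int) :=
  onesPow n (onesCorners n (onesDiag n (PySem.Set.ofList [((0 : Int), (0 : Int))])))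

def tomer_inv_cycle_alt (n : Int) : List (List Int) :=
  (PySem.List.pyRange 0 n 1).map (fun i =>
    (PySem.List.pyRange 0 n 1).map (fun j =>
      if (i, j) ∈ onesSet n then (1 : Int) else 0))

-- ===== PRECONDITION & SPEC =====
def Spec_tomer_inv_cycle (n : Int) (out : List (List Int)) : Prop := out = tomer_inv_cycle_alt n
instance (n : Int) (out : List (List Int)) : Decidable (Spec_tomer_inv_cycle n out) := by unfold Spec_tomer_inv_cycle; infer_instance

-- ===== CLAIM (what is proved, stated in full; the proofs are below) =====
def Claim_equal_tomer_inv_cycle : Prop := ∀ (n : Int), Dom_tomer_inv_cycle n → Spec_tomer_inv_cycle n (tomer_inv_cycle n)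

-- ===== LEMMAS AND PROOFS =====

-- modifying the element just past 'pre' in 'pre ++ [row]'
theorem modify_append_singleton {α : Type} (pre : List α) (row : α) (f : α → α) :
    (pre ++ [row]).modify pre.length f = pre ++ [f row] := by
  induction pre with
  | nil => rfl
  | cons a pre ih => simpa [List.modify] using ih

-- A's inner loop appends (map g R) to the last row
theorem innerA_eq (R : List Int) (g : Int → Int) :
    ∀ (pre : List (List Int)) (row : List Int),
      R.foldl (fun lst j => lst.modify pre.length (fun r => r ++ [g j])) (pre ++ [row])
        = pre ++ [row ++ R.map g] := by
  induction R with
  | nil => intro pre row; simp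
  | cons j R ih =>
      intro pre row
      simp only [List.foldl_cons, modify_append_singleton]
      simpa using ih pre (row ++ [g j])

-- A's outer loop, with the invariant that the row index equals the current length
theorem outerA_eq (n : Int) (R : List Int) :
    ∀ (m c : Nat) (pre : List (List Int)), pre.length = c →
      ((List.range' c m).map (fun k : Nat => (k : Int))).foldl (fun lst i =>
          R.foldl (fun lst j =>
            if condA n i j then lst.modify i.toNat (fun row => row ++ [1])
            else lst.modify i.toNat (fun row => row ++ [0])) (lst ++ [([] : List Int)]))
        pre
      = pre ++ (List.range' c m).map (fun k : Nat =>
          R.map (fun j => if condA n (k : Int) j then (1 : Int) else 0)) := by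
  intro m
  induction m with
  | zero => intro c pre h; simp
  | succ m ih =>
      intro c pre h
      rw [List.range'_succ, List.map_cons, List.foldl_cons]
      have hstep :
          R.foldl (fun lst j =>
              if condA n (c : Int) j then lst.modify (c : Int).toNat (fun row => row ++ [1])
              else lst.modify (c : Int).toNat (fun row => row ++ [0])) (pre ++ [([] : List Int)])
            = pre ++ [R.map (fun j => if condA n (c : Int) j then (1 : Int) else 0)] := by
        have hfun : (fun (lst : List (List Int)) (j : Int) =>
              if condA n (c : Int) j then lst.modify (c : Int).toNat (fun row => row ++ [1])
              else lst.modify (c : Int).toNat (fun row => row ++ [0]))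
            = (fun lst j => lst.modify pre.length
                (fun r => r ++ [if condA n (c : Int) j then (1 : Int) else 0])) := by
          funext lst j
          by_cases hc : condA n (c : Int) j <;> simp [hc, h, Int.toNat_natCast]
        rw [hfun]
        simpa using innerA_eq R
          (fun j => if condA n (c : Int) j then (1 : Int) else 0) pre []
      rw [hstep, ih (c + 1) _ (by simp [h]), List.append_assoc]
      simp

-- the range 0..n-1 as a mapped Nat range
theorem pyRange_zero_eq (n : Int) :
    PySem.List.pyRange 0 n 1 = (List.range' 0 n.toNat).map (fun k : Nat => (k : Int)) := by
  rw [PySem.List.pyRange_one, List.range_eq_range']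
  simp only [sub_zero, zero_add]

-- closed form for A
theorem tomer_inv_cycle_eq (n : Int) :
    tomer_inv_cycle n = (PySem.List.pyRange 0 n 1).map (fun i =>
      (PySem.List.pyRange 0 n 1).map (fun j => if condA n i j then (1 : Int) else 0)) := by
  unfold tomer_inv_cycle
  rw [pyRange_zero_eq n]
  rw [outerA_eq n _ n.toNat 0 [] rfl, List.nil_append]
  simp only [List.map_map]
  rfl

-- membership through a fold of two adds per element
theorem mem_foldl_add2 {α : Type} [BEq α] [LawfulBEq α] (f g : Int → α) :
    ∀ (L : List Int) (s : PySem.Set α) (x : α),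
      (x ∈ L.foldl (fun s k => (PySem.Set.add (PySem.Set.add s (f k)) (g k))) s)
        ↔ x ∈ s ∨ ∃ k ∈ L, x = f k ∨ x = g k := by
  intro L
  induction L with
  | nil => intro s x; simp
  | cons a L ih =>
      intro s x
      simp only [List.foldl_cons, ih, PySem.Set.mem_add, List.mem_cons]
      constructor
      · rintro (((h | h) | h) | ⟨k, hk, h⟩)
        · exact Or.inl h
        · exact Or.inr ⟨a, Or.inl rfl, Or.inl h⟩
        · exact Or.inr ⟨a, Or.inl rfl, Or.inr h⟩
        · exact Or.inr ⟨k, Or.inr hk, h⟩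
      · rintro (h | ⟨k, (rfl | hk), h⟩)
        · exact Or.inl (Or.inl (Or.inl h))
        · rcases h with h | h
          · exact Or.inl (Or.inl (Or.inr h))
          · exact Or.inl (Or.inr h)
        · exact Or.inr ⟨k, hk, h⟩

-- membership through a fold of one add per element
theorem mem_foldl_add1 {α : Type} [BEq α] [LawfulBEq α] (f : Int → α) :
    ∀ (L : List Int) (s : PySem.Set α) (x : α),
      (x ∈ L.foldl (fun s k => PySem.Set.add s (f k)) s) ↔ x ∈ s ∨ ∃ k ∈ L, x = f k := by
  intro L
  induction L with
  | nil => intro s x; simp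
  | cons a L ih =>
      intro s x
      simp only [List.foldl_cons, ih, PySem.Set.mem_add, List.mem_cons]
      constructor
      · rintro ((h | h) | ⟨k, hk, h⟩)
        · exact Or.inl h
        · exact Or.inr ⟨a, Or.inl rfl, h⟩
        · exact Or.inr ⟨k, Or.inr hk, h⟩
      · rintro (h | ⟨k, (rfl | hk), h⟩)
        · exact Or.inl (Or.inl h)
        · exact Or.inl (Or.inr h)
        · exact Or.inr ⟨k, hk, h⟩

-- what is in B's set
theorem mem_onesSet (n x y : Int) :
    (x, y) ∈ onesSet n ↔
      (x = 0 ∧ y = 0) ∨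
      (∃ k : Int, 0 ≤ k ∧ k < n - 1 ∧ ((x = k ∧ y = k + 1) ∨ (x = k + 1 ∧ y = k))) ∨
      (1 ≤ n ∧ x = n - 1 ∧ y = 0) ∨
      (1 ≤ n ∧ x = 0 ∧ y = n - 1) ∨
      (2 ≤ n ∧ ∃ k : Int, 0 ≤ k ∧ k < n ∧ x = PySem.Int.powMod k (n - 2).toNat n ∧ y = k) := by
  unfold onesSet onesPow onesCorners onesDiag
  by_cases h2 : n ≥ 2
  · have h1 : n ≥ 1 := by omega
    rw [if_pos h2, if_pos h1,
      mem_foldl_add1 (fun j => (PySem.Int.powMod j (n - 2).toNat n, j)),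
      PySem.Set.mem_add, PySem.Set.mem_add,
      mem_foldl_add2 (fun k => (k, k + 1)) (fun k => (k + 1, k))]
    simp only [PySem.Set.mem_ofList, List.mem_singleton, PySem.List.mem_pyRange_one,
      Prod.mk.injEq]
    constructor
    · rintro ((((h | ⟨k, ⟨hk0, hk1⟩, h⟩) | ⟨hx, hy⟩) | ⟨hx, hy⟩) | ⟨k, ⟨hk0, hk1⟩, hx, hy⟩)
      · exact Or.inl h
      · exact Or.inr (Or.inl ⟨k, hk0, hk1, h⟩)
      · exact Or.inr (Or.inr (Or.inl ⟨h1, hx, hy⟩))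
      · exact Or.inr (Or.inr (Or.inr (Or.inl ⟨h1, hx, hy⟩)))
      · exact Or.inr (Or.inr (Or.inr (Or.inr ⟨h2, k, hk0, hk1, hx, hy⟩)))
    · rintro (h | ⟨k, hk0, hk1, h⟩ | ⟨_, hx, hy⟩ | ⟨_, hx, hy⟩ | ⟨_, k, hk0, hk1, hx, hy⟩)
      · exact Or.inl (Or.inl (Or.inl (Or.inl h)))
      · exact Or.inl (Or.inl (Or.inl (Or.inr ⟨k, ⟨hk0, hk1⟩, h⟩)))
      · exact Or.inl (Or.inl (Or.inr ⟨hx, hy⟩))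
      · exact Or.inl (Or.inr ⟨hx, hy⟩)
      · exact Or.inr ⟨k, ⟨hk0, hk1⟩, hx, hy⟩
  · rw [if_neg h2]
    by_cases h1 : n ≥ 1
    · have hn : n = 1 := by omega
      rw [if_pos h1, PySem.Set.mem_add, PySem.Set.mem_add,
        mem_foldl_add2 (fun k => (k, k + 1)) (fun k => (k + 1, k))]
      simp only [PySem.Set.mem_ofList, List.mem_singleton, PySem.List.mem_pyRange_one,
        Prod.mk.injEq]
      constructor
      · rintro (((h | ⟨k, ⟨hk0, hk1⟩, h⟩) | ⟨hx, hy⟩) | ⟨hx, hy⟩)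
        · exact Or.inl h
        · omega
        · exact Or.inl ⟨by omega, hy⟩
        · exact Or.inl ⟨hx, by omega⟩
      · rintro (h | ⟨k, hk0, hk1, h⟩ | ⟨_, hx, hy⟩ | ⟨_, hx, hy⟩ | ⟨hh, _⟩)
        · exact Or.inl (Or.inl (Or.inl h))
        · omega
        · exact Or.inl (Or.inl (Or.inl ⟨by omega, hy⟩))
        · exact Or.inl (Or.inl (Or.inl ⟨hx, by omega⟩))
        · omega
    · rw [if_neg h1,
        mem_foldl_add2 (fun k => (k, k + 1)) (fun k => (k + 1, k))]
      simp only [PySem.Set.mem_ofList, List.mem_singleton, PySem.List.mem_pyRange_one,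
        Prod.mk.injEq]
      constructor
      · rintro (h | ⟨k, ⟨hk0, hk1⟩, h⟩)
        · exact Or.inl h
        · omega
      · rintro (h | ⟨k, hk0, hk1, h⟩ | ⟨hh, _⟩ | ⟨hh, _⟩ | ⟨hh, _⟩)
        · exact Or.inl h
        · omega
        · omega
        · omega
        · omega

-- per-cell equivalence of the two conditions, inside the grid
theorem cell_iff (n x y : Int) (hx0 : 0 ≤ x) (hxn : x < n) (hy0 : 0 ≤ y) (hyn : y < n) :
    condA n x y = true ↔ (x, y) ∈ onesSet n := by
  rw [mem_onesSet]
  simp only [condA, Bool.or_eq_true, Bool.and_eq_true, beq_iff_eq]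
  constructor
  · rintro (((((h | h) | h) | h) | h) | ⟨h, h0⟩)
    · exact Or.inr (Or.inl ⟨x, by omega, by omega, Or.inl ⟨rfl, by omega⟩⟩)
    · exact Or.inr (Or.inl ⟨y, by omega, by omega, Or.inr ⟨by omega, rfl⟩⟩)
    · exact Or.inr (Or.inr (Or.inl ⟨by omega, by omega, by omega⟩))
    · exact Or.inr (Or.inr (Or.inr (Or.inl ⟨by omega, by omega, by omega⟩)))
    · by_cases h2 : 2 ≤ n
      · exact Or.inr (Or.inr (Or.inr (Or.inr ⟨h2, y, hy0, hyn,
          by simp [PySem.Int.powMod, h], rfl⟩)))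
      · exact Or.inl ⟨by omega, by omega⟩
    · exact Or.inl ⟨h0, by omega⟩
  · rintro (⟨hx, hy⟩ | ⟨k, hk0, hkn, ⟨hx, hy⟩ | ⟨hx, hy⟩⟩ | ⟨h1, hx, hy⟩ | ⟨h1, hx, hy⟩ |
      ⟨h2, k, hk0, hkn, hx, hy⟩)
    · exact Or.inr ⟨by omega, hx⟩
    · exact Or.inl (Or.inl (Or.inl (Or.inl (Or.inl (by omega)))))
    · exact Or.inl (Or.inl (Or.inl (Or.inl (Or.inr (by omega)))))
    · exact Or.inl (Or.inl (Or.inl (Or.inr (by omega))))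
    · exact Or.inl (Or.inl (Or.inr (by omega)))
    · exact Or.inl (Or.inr (by subst hy; simp [PySem.Int.powMod] at hx; omega))

-- ===== VERDICT (by name: the statement is the Claim_ definition above) =====
theorem tomer_inv_cycle_spec : Claim_equal_tomer_inv_cycle := by
  intro n _
  show tomer_inv_cycle n = tomer_inv_cycle_alt n
  rw [tomer_inv_cycle_eq]
  unfold tomer_inv_cycle_alt
  apply List.map_congr_left
  intro i hi
  apply List.map_congr_left
  intro j hj
  rw [PySem.List.mem_pyRange_one] at hi hj
  exact if_congr (cell_iff n i j hi.1 hi.2 hj.1 hj.2) rfl rfl
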